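-- pv_equiv track=rewrite | github.com/leo-ai-for-trading/CodeChef | Contest/Binary String Xor.py | count0
-- ===== SOURCE A (Python) =====
-- def count0(s,n):
--     c=0
--     x=0
--     for i in s:
--         if(i=='0'):
--             if(x==0):
--                 c+=1
--         else:
--             if(x==1):
--                 c+=1
--                 x=0
--             else:
--                 x=1
--     if(x==1):
--         return 0
--     return c
-- ===== SOURCE B (Python) =====
-- def count0(s, n):
--     idx = [i for i, ch in enumerate(s) if ch != '0']
--     if len(idx) % 2 == 1:
--         return 0
--     it = iter(idx)
--     return len(s) - sum(b - a for a, b in zip(it, it))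
-- ===== Notes on version B (the rewrite author's own statement) =====
-- stated objective: alternative
-- what changed: B replaces A's per-character boolean state machine by extracting the list of positions of non-'0' characters and computing the answer with closed-form position arithmetic: 0 if the count is odd, else len(s) minus the sum of differences over consecutive position pairs.
import Mathlib
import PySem

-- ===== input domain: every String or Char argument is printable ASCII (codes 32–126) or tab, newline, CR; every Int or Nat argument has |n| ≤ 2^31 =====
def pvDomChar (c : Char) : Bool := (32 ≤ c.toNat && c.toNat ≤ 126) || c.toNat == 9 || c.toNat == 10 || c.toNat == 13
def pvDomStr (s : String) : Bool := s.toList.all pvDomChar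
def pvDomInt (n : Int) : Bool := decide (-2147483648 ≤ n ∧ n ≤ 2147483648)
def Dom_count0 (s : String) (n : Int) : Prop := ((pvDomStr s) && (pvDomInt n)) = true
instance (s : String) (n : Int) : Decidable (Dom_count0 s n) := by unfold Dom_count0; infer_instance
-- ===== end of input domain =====

-- B drops A's boolean state machine: it lists the positions of non-'0' characters and returns
-- len(s) minus the sum of paired position differences (0 if the count is odd); objective: alternative (same cost).


-- ===== PORT A =====
-- loop body of A: state (c, x)
def count0Step (st : Int × Int) (i : Char) : Int × Int :=
  if i = '0' then (if st.2 = 0 then (st.1 + 1, st.2) else st)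
  else if st.2 = 1 then (st.1 + 1, 0) else (st.1, 1)

def count0 (s : String) (n : Int) : Int :=
  let st := s.toList.foldl count0Step (0, 0)
  if st.2 = 1 then 0 else st.1

-- ===== PORT B =====
-- sum(b - a for a, b in zip(it, it)): consume the position list two at a time, front to back
def count0PairSum : List Int → Int
  | a :: b :: r => (b - a) + count0PairSum r
  | _ => 0

def count0_alt (s : String) (n : Int) : Int :=
  let idx := ((PySem.List.enumerate s.toList 0).filter (fun p => p.2 ≠ '0')).map (·.1)
  if PySem.Int.mod (idx.length : Int) 2 = 1 then 0
  else (s.toList.length : Int) - count0PairSum idx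

-- ===== PRECONDITION & SPEC =====
def Spec_count0 (s : String) (n : Int) (out : Int) : Prop := out = count0_alt s n
instance (s : String) (n : Int) (out : Int) : Decidable (Spec_count0 s n out) := by unfold Spec_count0; infer_instance

-- ===== CLAIM (what is proved, stated in full; the proofs are below) =====
def Claim_equal_count0 : Prop := ∀ (s : String) (n : Int), Dom_count0 s n → Spec_count0 s n (count0 s n)

-- ===== LEMMAS AND PROOFS =====

-- c-gain of A's scan started in state x ∈ {0, 1}
def specC : List Char → Int → Int
  | [], _ => 0
  | ch :: r, x =>
    if ch = '0' then (if x = 0 then 1 + specC r x else specC r x)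
    else (if x = 1 then 1 + specC r 0 else specC r 1)

-- final x of A's scan started in state x ∈ {0, 1}
def specX : List Char → Int → Int
  | [], x => x
  | ch :: r, x => if ch = '0' then specX r x else specX r (if x = 1 then 0 else 1)

-- alternating sum a0 - a1 + a2 - …
def altSum : List Int → Int
  | [] => 0
  | a :: r => a - altSum r

-- the position list of non-'0' chars, with starting offset s
def eposL (l : List Char) (s : Int) : List Int :=
  ((PySem.List.enumerate l s).filter (fun p => p.2 ≠ '0')).map (·.1)

lemma eposL_nil (s : Int) : eposL [] s = [] := by
  simp [eposL, PySem.List.enumerate_nil]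

lemma eposL_cons (ch : Char) (r : List Char) (s : Int) :
    eposL (ch :: r) s = if ch = '0' then eposL r (s + 1) else s :: eposL r (s + 1) := by
  by_cases h : ch = '0' <;> simp [eposL, PySem.List.enumerate_cons, h]

-- A's fold in terms of specC/specX
lemma foldA (l : List Char) (c x : Int) (hx : x = 0 ∨ x = 1) :
    l.foldl count0Step (c, x) = (c + specC l x, specX l x) := by
  induction l generalizing c x with
  | nil => simp [specC, specX]
  | cons ch r ih =>
    rw [List.foldl_cons]
    by_cases h0 : ch = '0' <;>
      rcases hx with hx | hx <;>
      · subst hx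
        simp only [count0Step, specC, specX, h0]
        norm_num
        rw [ih _ _ (by omega)]
        try ring_nf

-- the key closed forms for specC/specX via position lists
lemma spec_closed (l : List Char) (s : Int) :
    (specC l 0 = if (eposL l s).length % 2 = 0 then (l.length : Int) + altSum (eposL l s)
                 else altSum (eposL l s) - s)
  ∧ (specC l 1 = if (eposL l s).length % 2 = 0 then -altSum (eposL l s)
                 else (l.length : Int) - altSum (eposL l s) + s)
  ∧ (specX l 0 = if (eposL l s).length % 2 = 0 then 0 else 1)
  ∧ (specX l 1 = if (eposL l s).length % 2 = 0 then 1 else 0) := by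
  induction l generalizing s with
  | nil => simp [specC, specX, eposL_nil, altSum]
  | cons ch r ih =>
    obtain ⟨ih0, ih1, ihx0, ihx1⟩ := ih (s + 1)
    by_cases h0 : ch = '0'
    · rw [eposL_cons, if_pos h0]
      subst h0
      refine ⟨?_, ?_, ?_, ?_⟩ <;>
        simp only [specC, specX, ih0, ih1, ihx0, ihx1, List.length_cons] <;>
        norm_num <;>
        split_ifs <;>
        first | (exfalso; omega) | (push_cast; try ring)
    · rw [eposL_cons, if_neg h0]
      have hlen : (s :: eposL r (s + 1)).length = (eposL r (s + 1)).length + 1 := rfl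
      have halt : altSum (s :: eposL r (s + 1)) = s - altSum (eposL r (s + 1)) := rfl
      refine ⟨?_, ?_, ?_, ?_⟩ <;>
        simp only [specC, specX, if_neg h0, List.length_cons] <;>
        norm_num <;>
        simp only [ih0, ih1, ihx0, ihx1, halt] <;>
        split_ifs <;>
        first | (exfalso; omega) | (push_cast; try ring) | omega

-- for even-length lists the paired-difference sum is minus the alternating sum
lemma pairSum_even (l : List Int) (h : l.length % 2 = 0) :
    count0PairSum l = -altSum l := by
  induction l using count0PairSum.induct with
  | case1 a b r ih =>
    have : r.length % 2 = 0 := by simp [List.length_cons] at h; omega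
    simp [count0PairSum, altSum, ih this]
    ring
  | case2 l hne =>
    match l, hne with
    | [], _ => simp [count0PairSum, altSum]
    | [a], _ => simp [List.length_cons] at h
    | a :: b :: r, h1 => exact absurd rfl (fun heq => h1 a b r heq)

-- ===== VERDICT (by name: the statement is the Claim_ definition above) =====
theorem count0_spec : Claim_equal_count0 := by
  intro s n _
  unfold Spec_count0
  show count0 s n = count0_alt s n
  simp only [count0, count0_alt]
  rw [foldA s.toList 0 0 (Or.inl rfl)]
  obtain ⟨h0, -, hx0, -⟩ := spec_closed s.toList 0
  have hidx : ((PySem.List.enumerate s.toList 0).filter (fun p => p.2 ≠ '0')).map (·.1)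
      = eposL s.toList 0 := rfl
  rw [hidx]
  set E := eposL s.toList 0 with hE
  have hmod : PySem.Int.mod (E.length : Int) 2 = (E.length : Int) % 2 :=
    PySem.Int.mod_eq_emod_of_pos (by omega)
  by_cases hpar : E.length % 2 = 0
  · have : ¬ (PySem.Int.mod (E.length : Int) 2 = 1) := by
      rw [hmod]; omega
    rw [if_neg this]
    have hx : specX s.toList 0 = 0 := by rw [hx0, if_pos hpar]
    rw [hx, if_neg (by omega : ¬ (0 : Int) = 1)]
    rw [h0, if_pos hpar, pairSum_even E hpar]
    ring
  · have : PySem.Int.mod (E.length : Int) 2 = 1 := by rw [hmod]; omega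
    rw [if_pos this]
    have hx : specX s.toList 0 = 1 := by rw [hx0, if_neg hpar]
    rw [hx, if_pos rfl]
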